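-- pv_equiv track=rewrite | github.com/SergeyK3/neuroexam3 | app/services/results_export_service.py | parse_registration_lines
-- ===== SOURCE A (Python) =====
-- def parse_registration_lines(raw: str | None) -> tuple[str, str, str, str]:
--     """Четыре поля регистрации: дисциплина/курс, вид контроля, номер группы, ФИО (как в FSM).
--
--     Три строки без номера группы (старый формат) трактуются как: курс, контроль, ФИО; группа пустая.
--     """
--     if not raw or not str(raw).strip():
--         return ("", "", "", "")
--     lines = [ln.strip() for ln in str(raw).splitlines() if ln.strip()]
--     if len(lines) >= 4:
--         return (lines[0], lines[1], lines[2], lines[3])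
--     if len(lines) == 3:
--         return (lines[0], lines[1], "", lines[2])
--     if len(lines) == 2:
--         return (lines[0], lines[1], "", "")
--     if len(lines) == 1:
--         return (lines[0], "", "", "")
--     return ("", "", "", "")
-- ===== SOURCE B (Python) =====
-- _BREAKS = "\n\r\x0b\x0c\x1c\x1d\x1e\x85\u2028\u2029"
--
-- def parse_registration_lines(raw):
--     if raw is None:
--         return ("", "", "", "")
--     fields = []
--     cur = []
--     for ch in str(raw):
--         if ch in _BREAKS:
--             field = "".join(cur).strip()
--             cur = []
--             if field and len(fields) < 4:
--                 fields.append(field)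
--         else:
--             cur.append(ch)
--     field = "".join(cur).strip()
--     if field and len(fields) < 4:
--         fields.append(field)
--     if len(fields) == 3:
--         return (fields[0], fields[1], "", fields[2])
--     padded = fields + ["", "", "", ""]
--     return (padded[0], padded[1], padded[2], padded[3])
-- ===== Notes on version B (the rewrite author's own statement) =====
-- stated objective: alternative
-- what changed: Replaces A's staged pipeline (splitlines, strip each, filter, then a per-length branch cascade) with a single streaming left-to-right scan over the characters that flushes a current-line buffer at each line-break char, keeping at most the first four stripped non-empty fields as it goes.
import Mathlib
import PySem

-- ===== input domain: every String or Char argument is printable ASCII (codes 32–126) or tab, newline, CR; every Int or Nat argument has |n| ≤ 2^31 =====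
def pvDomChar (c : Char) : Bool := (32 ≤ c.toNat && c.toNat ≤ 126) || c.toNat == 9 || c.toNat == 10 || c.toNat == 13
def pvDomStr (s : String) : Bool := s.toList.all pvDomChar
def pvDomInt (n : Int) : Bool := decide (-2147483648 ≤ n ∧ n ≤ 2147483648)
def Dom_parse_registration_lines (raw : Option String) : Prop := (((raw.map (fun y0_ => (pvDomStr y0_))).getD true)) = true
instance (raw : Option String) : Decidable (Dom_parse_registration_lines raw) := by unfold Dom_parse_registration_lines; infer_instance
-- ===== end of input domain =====

-- B replaces A's staged pipeline (splitlines / strip each / filter / per-length branch cascade) with a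
-- single streaming scan over the characters that flushes a current-line buffer at each line-break
-- character, keeping at most the first four stripped non-empty fields (objective: alternative).

-- ===== PORT A =====
def parse_registration_lines (raw : Option String) : String × String × String × String :=
  match raw with
  | none => ("", "", "", "")
  | some s =>
    if s = "" ∨ PySem.Str.strip s = "" then ("", "", "", "")
    else
      let lines := ((PySem.Str.splitlines s).map PySem.Str.strip).filter (fun ln => ln ≠ "")
      if lines.length ≥ 4 then (lines.getD 0 "", lines.getD 1 "", lines.getD 2 "", lines.getD 3 "")
      else if lines.length = 3 then (lines.getD 0 "", lines.getD 1 "", "", lines.getD 2 "")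
      else if lines.length = 2 then (lines.getD 0 "", lines.getD 1 "", "", "")
      else if lines.length = 1 then (lines.getD 0 "", "", "", "")
      else ("", "", "", "")

-- ===== PORT B =====
-- port of `ch in _BREAKS` (the string literal of Source B, as a character list)
def altIsBreak (c : Char) : Bool :=
  c ∈ ['\n', '\x0d', '\x0b', '\x0c', '\x1c', '\x1d', '\x1e', '\x85', '\u2028', '\u2029']

-- port of the flush step: field = "".join(cur).strip(); if field and len(fields) < 4: fields.append(field)
def altFlush (fields : List (List Char)) (cur : List Char) : List (List Char) :=
  let field := PySem.Chars.strip cur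
  if field ≠ [] ∧ fields.length < 4 then fields ++ [field] else fields

-- port of the `for ch in str(raw)` loop (state: fields, cur)
def altLoop (cs : List Char) (fields : List (List Char)) (cur : List Char) :
    List (List Char) × List Char :=
  match cs with
  | [] => (fields, cur)
  | c :: rest =>
    if altIsBreak c then altLoop rest (altFlush fields cur) []
    else altLoop rest fields (cur ++ [c])

def parse_registration_lines_alt (raw : Option String) : String × String × String × String :=
  match raw with
  | none => ("", "", "", "")
  | some s =>
    let p := altLoop s.toList [] []
    let fields := altFlush p.1 p.2
    if fields.length = 3 then
      (String.ofList (fields.getD 0 []), String.ofList (fields.getD 1 []), "", String.ofList (fields.getD 2 []))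
    else
      let padded := fields ++ [[], [], [], []]
      (String.ofList (padded.getD 0 []), String.ofList (padded.getD 1 []),
       String.ofList (padded.getD 2 []), String.ofList (padded.getD 3 []))

-- ===== PRECONDITION & SPEC =====
def Spec_parse_registration_lines (raw : Option String) (out : String × String × String × String) : Prop := out = parse_registration_lines_alt raw
instance (raw : Option String) (out : String × String × String × String) : Decidable (Spec_parse_registration_lines raw out) := by unfold Spec_parse_registration_lines; infer_instance

-- ===== CLAIM (what is proved, stated in full; the proofs are below) =====
def Claim_equal_parse_registration_lines : Prop := ∀ (raw : Option String), Dom_parse_registration_lines raw → Spec_parse_registration_lines raw (parse_registration_lines raw)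

-- ===== LEMMAS AND PROOFS =====
def pvIsB (c : Char) : Bool :=
  decide (c.toNat = 10) || decide (c.toNat = 13) || decide (c.toNat = 11) || decide (c.toNat = 12) ||
  decide (c.toNat = 28) || decide (c.toNat = 29) || decide (c.toNat = 30) || decide (c.toNat = 133) ||
  decide (c.toNat = 8232) || decide (c.toNat = 8233)
lemma charEq (c d : Char) : (c = d) ↔ (c.toNat = d.toNat) := by
  constructor
  · intro h; subst h; rfl
  · intro h; exact Char.ext (UInt32.toNat_inj.mp h)
lemma isB_eq (c : Char) : pvIsB c = altIsBreak c := by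
  simp only [pvIsB, altIsBreak, List.mem_cons, List.not_mem_nil, or_false, Bool.decide_or, charEq, Bool.or_assoc]
  rfl
lemma splitlines_eq_go (cs : List Char) :
    PySem.Chars.splitlines cs = PySem.Chars.splitlines.go pvIsB cs [] [] := rfl
def pvF (isB : Char → Bool) : List Char → List Char → List (List Char)
  | cur, [] => if cur = [] then [] else [cur]
  | cur, '\x0d' :: '\n' :: rest => cur :: pvF isB [] rest
  | cur, c :: rest => if isB c then cur :: pvF isB [] rest else pvF isB (cur ++ [c]) rest
lemma go_eq_pvF (isB : Char → Bool) (cs cur : List Char) (acc : List (List Char)) :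
    PySem.Chars.splitlines.go isB cs cur acc = acc.reverse ++ pvF isB cur.reverse cs := by
  induction cs, cur, acc using PySem.Chars.splitlines.go.induct isB with
  | case1 cur acc h =>
    rw [PySem.Chars.splitlines.go]
    simp_all [pvF, List.isEmpty_iff]
  | case2 cur acc h =>
    rw [PySem.Chars.splitlines.go]
    simp_all [pvF, List.isEmpty_iff]
  | case3 rest cur acc ih =>
    rw [PySem.Chars.splitlines.go]
    simp [pvF, ih]
  | case4 c rest cur acc hne hb ih =>
    rw [PySem.Chars.splitlines.go]
    all_goals first
      | (rw [pvF.eq_3 _ _ _ _ hne]; simp [hb, ih])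
      | exact hne
  | case5 c rest cur acc hne hb ih =>
    rw [PySem.Chars.splitlines.go]
    all_goals first
      | (rw [pvF.eq_3 _ _ _ _ hne]; simp [hb, ih])
      | exact hne
def pvPieces (cs : List Char) : List (List Char) :=
  match cs with
  | [] => [[]]
  | c :: rest => if altIsBreak c then [] :: pvPieces rest else (pvPieces rest).modifyHead (c :: ·)
def pvStripF (ps : List (List Char)) : List (List Char) :=
  (ps.map PySem.Chars.strip).filter (fun l => l ≠ [])

lemma pvPieces_ne_nil (cs : List Char) : pvPieces cs ≠ [] := by
  induction cs with
  | nil => simp [pvPieces]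
  | cons c rest ih => cases h : pvPieces rest <;> simp_all [pvPieces] <;> split <;> simp

lemma stripF_cons (p : List Char) (ps : List (List Char)) :
    pvStripF (p :: ps) =
      if PySem.Chars.strip p = [] then pvStripF ps else PySem.Chars.strip p :: pvStripF ps := by
  by_cases h : PySem.Chars.strip p = [] <;> simp [pvStripF, h]

lemma modifyHead_nil_append (l : List (List Char)) : l.modifyHead (fun x => [] ++ x) = l := by
  cases l <;> simp

lemma modifyHead_fun_id (l : List (List Char)) : l.modifyHead (fun x => x) = l := by
  cases l <;> simp

lemma strip_nil : PySem.Chars.strip ([] : List Char) = [] := rfl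

lemma stripF_pvF (cur cs : List Char) :
    pvStripF (pvF pvIsB cur cs) = pvStripF ((pvPieces cs).modifyHead (cur ++ ·)) := by
  induction cur, cs using pvF.induct pvIsB with
  | case1 =>
    simp [pvF, pvPieces, pvStripF, strip_nil]
  | case2 cur h =>
    simp [pvF, pvPieces, h, stripF_cons]
  | case3 cur rest ih =>
    rw [pvF]
    have hb : altIsBreak '\x0d' = true := by decide
    have hb2 : altIsBreak '\n' = true := by decide
    simp [pvPieces, hb, hb2, stripF_cons, ih, modifyHead_nil_append, strip_nil, modifyHead_fun_id]
  | case4 cur c rest hne hb ih =>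
    rw [pvF.eq_3 _ _ _ _ hne]
    rw [pvPieces, ← isB_eq, hb]
    simp [stripF_cons, ih, modifyHead_nil_append, strip_nil, modifyHead_fun_id]
  | case5 cur c rest hne hb ih =>
    rw [pvF.eq_3 _ _ _ _ hne]
    rw [pvPieces, ← isB_eq]
    rcases h : pvPieces rest with _ | ⟨q, qs⟩
    · exact absurd h (pvPieces_ne_nil rest)
    · simp [hb, ih, h, stripF_cons]

lemma altLoop_spec (cs : List Char) (fields : List (List Char)) (cur : List Char) :
    altFlush (altLoop cs fields cur).1 (altLoop cs fields cur).2
      = List.foldl altFlush fields ((pvPieces cs).modifyHead (cur ++ ·)) := by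
  induction cs generalizing fields cur with
  | nil => simp [altLoop, pvPieces]
  | cons c rest ih =>
    rw [altLoop, pvPieces]
    by_cases hb : altIsBreak c
    · simp [hb, ih, modifyHead_nil_append, modifyHead_fun_id]
    · rcases h : pvPieces rest with _ | ⟨q, qs⟩
      · exact absurd h (pvPieces_ne_nil rest)
      · simp [hb, ih, h]

lemma foldl_flush (ps : List (List Char)) (fields : List (List Char)) :
    List.foldl altFlush fields ps = fields ++ (pvStripF ps).take (4 - fields.length) := by
  induction ps generalizing fields with
  | nil => simp [pvStripF]
  | cons p ps ih =>
    rw [List.foldl_cons, ih, stripF_cons]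
    by_cases h : PySem.Chars.strip p = []
    · simp [altFlush, h]
    · by_cases hl : fields.length < 4
      · have h4 : 4 - fields.length = (4 - (fields.length + 1)) + 1 := by omega
        simp [altFlush, h, hl, h4]
      · have h4 : 4 - fields.length = 0 := by omega
        simp [altFlush, h, hl, h4]

lemma fields_eq (cs : List Char) :
    altFlush (altLoop cs [] []).1 (altLoop cs [] []).2
      = (pvStripF (PySem.Chars.splitlines cs)).take 4 := by
  rw [altLoop_spec, foldl_flush, splitlines_eq_go, go_eq_pvF]
  simp [stripF_pvF]

lemma strip_nil_of_all (cs : List Char) (h : ∀ c ∈ cs, PySem.Chars.isspace c) :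
    PySem.Chars.strip cs = [] := by
  have hl : PySem.Chars.lstrip cs = [] := by
    simp [PySem.Chars.lstrip, List.dropWhile_eq_nil_iff]
    exact fun c hc => h c hc
  simp [PySem.Chars.strip, hl, PySem.Chars.rstrip]

lemma pvPieces_subset (cs : List Char) (p : List Char) (hp : p ∈ pvPieces cs) :
    ∀ c ∈ p, c ∈ cs := by
  induction cs generalizing p with
  | nil => simp_all [pvPieces]
  | cons c rest ih =>
    rw [pvPieces] at hp
    by_cases hb : altIsBreak c
    · simp [hb] at hp
      rcases hp with h | h
      · simp [h]
      · exact fun x hx => List.mem_cons_of_mem _ (ih p h x hx)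
    · rcases h : pvPieces rest with _ | ⟨q, qs⟩
      · exact absurd h (pvPieces_ne_nil rest)
      · simp [hb, h] at hp
        rcases hp with h' | h'
        · subst h'
          intro x hx
          rcases List.mem_cons.mp hx with h2 | h2
          · simp [h2]
          · exact List.mem_cons_of_mem _ (ih q (by simp [h]) x h2)
        · exact fun x hx => List.mem_cons_of_mem _ (ih p (by simp [h, h']) x hx)

lemma stripF_nil_of (ps : List (List Char)) (h : ∀ p ∈ ps, PySem.Chars.strip p = []) :
    pvStripF ps = [] := by
  simp [pvStripF, List.filter_eq_nil_iff]
  exact h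

lemma all_of_strip_nil (cs : List Char) (h : PySem.Chars.strip cs = []) :
    ∀ c ∈ cs, PySem.Chars.isspace c := by
  have hl : ∀ c ∈ PySem.Chars.lstrip cs, PySem.Chars.isspace c := by
    have h2 : List.dropWhile PySem.Chars.isspace (PySem.Chars.lstrip cs).reverse = [] := by
      simpa [PySem.Chars.strip, PySem.Chars.rstrip] using h
    rw [List.dropWhile_eq_nil_iff] at h2
    intro c hc
    exact h2 c (List.mem_reverse.mpr hc)
  intro c hc
  rw [show cs = List.takeWhile PySem.Chars.isspace cs ++ List.dropWhile PySem.Chars.isspace cs from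
    (List.takeWhile_append_dropWhile).symm] at hc
  rcases List.mem_append.mp hc with h' | h'
  · exact List.mem_takeWhile_imp h'
  · exact hl c h'

lemma lines_eq_gen (ls : List String) :
    (ls.map PySem.Str.strip).filter (fun ln => ln ≠ "")
      = (((ls.map String.toList).map PySem.Chars.strip).filter (fun l => l ≠ [])).map String.ofList := by
  induction ls with
  | nil => rfl
  | cons a ls ih =>
    simp only [List.map_cons, List.filter_cons]
    by_cases h : PySem.Str.strip a = ""
    · have h2 : PySem.Chars.strip a.toList = [] := by rw [← PySem.Str.toList_strip, h]; rfl
      simp [h, h2]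
      simpa [Function.comp] using ih
    · have h2 : PySem.Chars.strip a.toList ≠ [] := by
        rw [← PySem.Str.toList_strip]
        intro hh

        exact h (by rw [← String.ofList_toList (s := PySem.Str.strip a), hh])
      have h3 : String.ofList (PySem.Chars.strip a.toList) = PySem.Str.strip a := by
        rw [← PySem.Str.toList_strip, String.ofList_toList]
      simp [h, h2, h3]
      simpa [Function.comp] using ih

lemma stripF_splitlines_eq_pieces (cs : List Char) :
    pvStripF (PySem.Chars.splitlines cs) = pvStripF (pvPieces cs) := by
  rw [splitlines_eq_go, go_eq_pvF]
  simp [stripF_pvF, modifyHead_fun_id]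

lemma main_eq (s : String) :
    parse_registration_lines (some s) = parse_registration_lines_alt (some s) := by
  rw [parse_registration_lines, parse_registration_lines_alt]
  simp only [fields_eq]
  by_cases hg : s = "" ∨ PySem.Str.strip s = ""
  · rw [if_pos hg]
    have hsp : ∀ c ∈ s.toList, PySem.Chars.isspace c := by
      rcases hg with h | h
      · subst h; simp
      · exact all_of_strip_nil _ (by rw [← PySem.Str.toList_strip, h]; rfl)
    have hz : pvStripF (PySem.Chars.splitlines s.toList) = [] := by
      rw [stripF_splitlines_eq_pieces]
      exact stripF_nil_of _ (fun p hp =>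
        strip_nil_of_all p (fun c hc => hsp c (pvPieces_subset _ p hp c hc)))
    rw [hz]
    rfl
  · rw [if_neg hg]
    have hl : ((PySem.Str.splitlines s).map PySem.Str.strip).filter (fun ln => ln ≠ "")
        = (pvStripF (PySem.Chars.splitlines s.toList)).map String.ofList := by
      rw [lines_eq_gen, PySem.Str.splitlines_map_toList]; rfl
    simp only [hl]
    rcases pvStripF (PySem.Chars.splitlines s.toList) with _ | ⟨a, _ | ⟨b, _ | ⟨c, _ | ⟨d, t⟩⟩⟩⟩
    · rfl
    · rfl
    · rfl
    · rfl
    · simp [List.getD, List.take_succ_cons]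

-- ===== VERDICT (by name: the statement is the Claim_ definition above) =====
theorem parse_registration_lines_spec : Claim_equal_parse_registration_lines := by
  intro raw _
  unfold Spec_parse_registration_lines
  cases raw with
  | none => rfl
  | some s => exact main_eq s
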